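-- pv_equiv track=rewrite | github.com/Yuseidosukoiya/kondoImamiyaProblem | deprecated/procedural/simulation.py | generate_lineups
-- ===== SOURCE A (Python) =====
-- from itertools import combinations
--
-- def generate_lineups(num_imamiya):
--     """
--     9人中、指定された人数の imamiya を配置する全パターンのラインナップを生成。
--     各ラインナップは、リストの各要素が 'imamiya' または 'kondo' となる長さ9のリストです。
--     """
--     lineups = []
--     # 0～8 のインデックスから imamiya を配置する位置を全組み合わせで求める
--     for positions in combinations(range(9), num_imamiya):
--         lineup = []
--         for i in range(9):
--             if i in positions:
--                 lineup.append('imamiya')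
--             else:
--                 lineup.append('kondo')
--         lineups.append(lineup)
--     return lineups
-- ===== SOURCE B (Python) =====
-- def generate_lineups(num_imamiya):
--     # Direct recursive construction: all length-9 lineups with exactly k 'imamiya',
--     # generated position-by-position ('imamiya' branch first), which yields the same
--     # lexicographic order as combinations of positions.
--     def gen(n, k):
--         if k < 0 or k > n:
--             return []
--         if n == 0:
--             return [[]]
--         return [['imamiya'] + rest for rest in gen(n - 1, k - 1)] + \
--                [['kondo'] + rest for rest in gen(n - 1, k)]
--     return gen(9, num_imamiya)
-- ===== Notes on version B (the rewrite author's own statement) =====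
-- stated objective: simpler
-- what changed: B replaces the combinations-of-positions enumeration plus a per-position membership test with a direct binary recursion that builds each length-9 lineup cell by cell, choosing 'imamiya' or 'kondo' at each position.
-- outside the precondition, e.g. on generate_lineups(-1): A raises ValueError, B returns []
-- crash fix: For negative num_imamiya, A raises ValueError ('r must be non-negative') from combinations; B naturally returns []. — e.g. on generate_lineups(-1): A raises ValueError, B returns []
import Mathlib
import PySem

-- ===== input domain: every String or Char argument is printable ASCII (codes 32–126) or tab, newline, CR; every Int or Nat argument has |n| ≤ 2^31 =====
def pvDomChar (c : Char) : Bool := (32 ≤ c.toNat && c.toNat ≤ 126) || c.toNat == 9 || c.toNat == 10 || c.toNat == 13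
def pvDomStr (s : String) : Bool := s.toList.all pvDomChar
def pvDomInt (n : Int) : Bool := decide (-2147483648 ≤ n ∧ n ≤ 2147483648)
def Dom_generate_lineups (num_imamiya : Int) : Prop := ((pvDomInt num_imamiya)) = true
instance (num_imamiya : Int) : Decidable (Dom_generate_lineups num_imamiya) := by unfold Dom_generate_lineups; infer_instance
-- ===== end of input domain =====

-- B builds each length-9 lineup by a direct binary recursion (imamiya/kondo per cell)
-- instead of enumerating position combinations and testing membership; objective: simpler.
-- A raises ValueError for negative num_imamiya (excluded by Pre_); B returns an empty list there.
set_option maxRecDepth 8000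


-- ===== PORT A =====
-- itertools.combinations(xs, k), lexicographic order (exact: same enumeration order)
def pvCombos (xs : List Int) (k : Nat) : List (List Int) :=
  match k, xs with
  | 0, _ => [[]]
  | _ + 1, [] => []
  | k + 1, x :: rest => (pvCombos rest k).map (fun c => x :: c) ++ pvCombos rest (k + 1)

def generate_lineups (num_imamiya : Int) : List (List String) :=
  -- guard only for totality: Python's combinations raises ValueError for negative r (outside Pre_)
  if num_imamiya < 0 then []
  else
    (pvCombos (PySem.List.pyRange 0 9 1) num_imamiya.toNat).foldl
      (fun lineups positions =>
        lineups ++ [(PySem.List.pyRange 0 9 1).foldl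
          (fun lineup i =>
            lineup ++ [if positions.contains i then "imamiya" else "kondo"]) []]) []

-- ===== PORT B =====
def pvGen : Nat → Int → List (List String)
  | n, k =>
    if k < 0 ∨ k > (n : Int) then []
    else
      match n with
      | 0 => [[]]
      | m + 1 =>
        ((pvGen m (k - 1)).map (fun rest => "imamiya" :: rest)) ++
        ((pvGen m k).map (fun rest => "kondo" :: rest))

def generate_lineups_alt (num_imamiya : Int) : List (List String) :=
  pvGen 9 num_imamiya

-- ===== PRECONDITION & SPEC =====
-- Pre_ excludes negative num_imamiya, where Python's combinations raises ValueError.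
def Pre_generate_lineups (num_imamiya : Int) : Prop := 0 ≤ num_imamiya
instance (num_imamiya : Int) : Decidable (Pre_generate_lineups num_imamiya) := by
  unfold Pre_generate_lineups; infer_instance
def pvWitness_generate_lineups : Int := 2

-- For negative num_imamiya, A raises ValueError ('r must be non-negative'); B returns an empty list.
def Raises_generate_lineups (num_imamiya : Int) : Prop := num_imamiya < 0
instance (num_imamiya : Int) : Decidable (Raises_generate_lineups num_imamiya) := by
  unfold Raises_generate_lineups; infer_instance
def pvRaiseWitness_generate_lineups : Int := -1
def pvRaiseWitnessOut_generate_lineups : List (List String) := []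

def Spec_generate_lineups (num_imamiya : Int) (out : List (List String)) : Prop :=
  out = generate_lineups_alt num_imamiya
instance (num_imamiya : Int) (out : List (List String)) : Decidable (Spec_generate_lineups num_imamiya out) := by
  unfold Spec_generate_lineups; infer_instance

-- ===== CLAIM =====
def Claim_equal_generate_lineups : Prop :=
  ∀ (num_imamiya : Int), Dom_generate_lineups num_imamiya →
    Pre_generate_lineups num_imamiya →
    Spec_generate_lineups num_imamiya (generate_lineups num_imamiya)

def Claim_raises_generate_lineups : Prop :=
  (∀ (num_imamiya : Int), Dom_generate_lineups num_imamiya →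
      Raises_generate_lineups num_imamiya → ¬ Pre_generate_lineups num_imamiya) ∧
  (Dom_generate_lineups (pvRaiseWitness_generate_lineups) ∧
   Raises_generate_lineups (pvRaiseWitness_generate_lineups) ∧
   generate_lineups_alt (pvRaiseWitness_generate_lineups) = pvRaiseWitnessOut_generate_lineups)

-- ===== LEMMAS AND PROOFS =====

-- combinations of a too-short list is empty
theorem pvCombos_nil_of_lt (xs : List Int) (k : Nat) (h : xs.length < k) :
    pvCombos xs k = [] := by
  induction xs generalizing k with
  | nil =>
    match k with
    | 0 => simp at h
    | k + 1 => rfl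
  | cons x rest ih =>
    match k with
    | 0 => simp at h
    | k + 1 =>
      simp only [pvCombos]
      rw [ih k (by simpa using h), ih (k + 1) (by simp at h; omega)]
      rfl

theorem pvGen_big (k : Int) (h : 9 < k) : pvGen 9 k = [] := by
  rw [pvGen]
  simp [h]

-- ===== VERDICT =====
theorem generate_lineups_spec : Claim_equal_generate_lineups := by
  intro n _ hpre
  unfold Spec_generate_lineups
  by_cases hle : n ≤ 9
  · unfold Pre_generate_lineups at hpre
    interval_cases n <;> decide
  · have hgt : 9 < n := by omega
    unfold generate_lineups generate_lineups_alt
    rw [if_neg (by omega), pvGen_big n hgt,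
        pvCombos_nil_of_lt _ n.toNat (by simp [PySem.List.length_pyRange_one]; omega)]
    rfl

@[simp]
theorem generate_lineups_raises : Claim_raises_generate_lineups := by
  unfold Claim_raises_generate_lineups
  exact ⟨fun n _ h => by unfold Raises_generate_lineups Pre_generate_lineups at *; omega,
         by decide⟩
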